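-- pv_equiv track=rewrite | github.com/pypi-data/pypi-mirror-398 | packages/llmling-agent/llmling_agent-1.17.1-py3-none-any.whl/llmling_agent_toolsets/fsspec_toolset/helpers.py | truncate_lines
-- ===== SOURCE A (Python) =====
-- DEFAULT_MAX_SIZE = 64_000
--
-- def truncate_lines(
--     lines: list[str], offset: int = 0, limit: int | None = None, max_bytes: int = DEFAULT_MAX_SIZE
-- ) -> tuple[list[str], bool]:
--     """Truncate lines with offset/limit and byte size constraints.
--
--     Args:
--         lines: List of text lines
--         offset: Starting line index (0-based)
--         limit: Maximum number of lines to include (None = no limit)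
--         max_bytes: Maximum total bytes (default: 64KB)
--
--     Returns:
--         Tuple of (truncated_lines, was_truncated)
--     """
--     # Apply offset
--     start_idx = max(0, offset)
--     if start_idx >= len(lines):
--         return [], False
--
--     # Apply line limit
--     end_idx = min(len(lines), start_idx + limit) if limit is not None else len(lines)
--
--     selected_lines = lines[start_idx:end_idx]
--
--     # Apply byte limit
--     result_lines: list[str] = []
--     total_bytes = 0
--
--     for line in selected_lines:
--         line_bytes = len(line.encode("utf-8"))
--         if total_bytes + line_bytes > max_bytes:
--             # Would exceed limit - this is actual truncation
--             return result_lines, True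
--
--         result_lines.append(line)
--         total_bytes += line_bytes
--
--     # Successfully returned all requested content - not truncated
--     # (byte truncation already handled above with early return)
--     return result_lines, False
-- ===== SOURCE B (Python) =====
-- DEFAULT_MAX_SIZE = 64_000
--
--
-- def truncate_lines(lines, offset=0, limit=None, max_bytes=DEFAULT_MAX_SIZE):
--     """Prefix-sum table + binary search instead of the accumulate-and-early-exit loop."""
--     start_idx = max(0, offset)
--     if start_idx >= len(lines):
--         return [], False
--
--     end_idx = min(len(lines), start_idx + limit) if limit is not None else len(lines)
--     selected = lines[start_idx:end_idx]
--
--     # cumulative byte totals: sums[i] = bytes of selected[0..i]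
--     sums = []
--     total = 0
--     for line in selected:
--         total += len(line.encode("utf-8"))
--         sums.append(total)
--
--     # binary search: k = number of leading prefix totals <= max_bytes
--     lo, hi = 0, len(sums)
--     while lo < hi:
--         mid = (lo + hi) // 2
--         if sums[mid] <= max_bytes:
--             lo = mid + 1
--         else:
--             hi = mid
--     k = lo
--     return selected[:k], k < len(selected)
-- ===== Notes on version B (the rewrite author's own statement) =====
-- stated objective: alternative
-- what changed: Replaces A's incremental accumulate-and-early-exit byte loop with a cumulative prefix-sum table over the selected slice plus a binary search for the cutoff index k (kept lines = selected[:k], truncated iff k < len(selected)).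
import Mathlib
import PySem

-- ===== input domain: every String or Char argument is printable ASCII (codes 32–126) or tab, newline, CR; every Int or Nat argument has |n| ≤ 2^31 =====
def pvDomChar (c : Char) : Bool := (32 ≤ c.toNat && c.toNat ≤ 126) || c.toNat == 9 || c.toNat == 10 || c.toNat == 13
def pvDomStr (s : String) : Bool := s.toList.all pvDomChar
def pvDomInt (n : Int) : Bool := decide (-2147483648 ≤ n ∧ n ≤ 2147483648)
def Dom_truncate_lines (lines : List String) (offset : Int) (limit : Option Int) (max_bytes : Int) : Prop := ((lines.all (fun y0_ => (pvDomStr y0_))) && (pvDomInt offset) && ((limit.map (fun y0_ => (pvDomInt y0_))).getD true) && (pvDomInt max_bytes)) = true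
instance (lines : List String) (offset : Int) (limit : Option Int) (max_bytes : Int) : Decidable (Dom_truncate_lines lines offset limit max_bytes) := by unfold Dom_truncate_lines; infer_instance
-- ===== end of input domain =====

-- B replaces A's accumulate-and-early-exit byte loop by a prefix-sum table plus a binary search for the cutoff (alternative decomposition, same cost).
-- len(line.encode("utf-8")) is ported as PySem.Str.len: exact on the ASCII domain Dom_truncate_lines admits (every admitted char is 1 UTF-8 byte).

-- ===== PORT A =====
def tlLoopA (maxb : Int) : List String → List String → Int → List String × Bool
  | [], result_lines, _ => (result_lines, false)
  | line :: rest, result_lines, total_bytes =>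
    if total_bytes + PySem.Str.len line > maxb then (result_lines, true)
    else tlLoopA maxb rest (result_lines ++ [line]) (total_bytes + PySem.Str.len line)

def truncate_lines (lines : List String) (offset : Int) (limit : Option Int) (max_bytes : Int) : List String × Bool :=
  let start_idx := max 0 offset
  if start_idx ≥ PySem.List.len lines then ([], false)
  else
    let end_idx := match limit with
      | some l => min (PySem.List.len lines) (start_idx + l)
      | none => PySem.List.len lines
    let selected_lines := PySem.List.slice lines (some start_idx) (some end_idx)
    tlLoopA max_bytes selected_lines [] 0

-- ===== PORT B =====
-- cumulative byte totals of the selected lines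
def tlSums : List String → Int → List Int
  | [], _ => []
  | line :: rest, total =>
    (total + PySem.Str.len line) :: tlSums rest (total + PySem.Str.len line)

-- hand-written binary search from Source B: first index whose prefix total exceeds maxb
def tlBsearch (sums : List Int) (maxb : Int) (lo hi : Nat) : Nat :=
  if _h : lo < hi then
    let mid := (lo + hi) / 2
    if sums.getD mid 0 ≤ maxb then tlBsearch sums maxb (mid + 1) hi
    else tlBsearch sums maxb lo mid
  else lo
termination_by hi - lo
decreasing_by all_goals omega

def truncate_lines_alt (lines : List String) (offset : Int) (limit : Option Int) (max_bytes : Int) : List String × Bool :=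
  let start_idx := max 0 offset
  if start_idx ≥ PySem.List.len lines then ([], false)
  else
    let end_idx := match limit with
      | some l => min (PySem.List.len lines) (start_idx + l)
      | none => PySem.List.len lines
    let selected := PySem.List.slice lines (some start_idx) (some end_idx)
    let sums := tlSums selected 0
    let k := tlBsearch sums max_bytes 0 sums.length
    (selected.take k, decide (k < selected.length))

-- ===== PRECONDITION & SPEC =====
def Spec_truncate_lines (lines : List String) (offset : Int) (limit : Option Int) (max_bytes : Int) (out : List String × Bool) : Prop := out = truncate_lines_alt lines offset limit max_bytes
instance (lines : List String) (offset : Int) (limit : Option Int) (max_bytes : Int) (out : List String × Bool) : Decidable (Spec_truncate_lines lines offset limit max_bytes out) := by unfold Spec_truncate_lines; infer_instance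

-- ===== CLAIM (what is proved, stated in full; the proofs are below) =====
def Claim_equal_truncate_lines : Prop := ∀ (lines : List String) (offset : Int) (limit : Option Int) (max_bytes : Int), Dom_truncate_lines lines offset limit max_bytes → Spec_truncate_lines lines offset limit max_bytes (truncate_lines lines offset limit max_bytes)

-- ===== LEMMAS AND PROOFS =====

-- number of lines A's loop keeps
def tlCount (maxb : Int) : List String → Int → Nat
  | [], _ => 0
  | line :: rest, total =>
    if total + PySem.Str.len line > maxb then 0
    else 1 + tlCount maxb rest (total + PySem.Str.len line)

lemma str_len_nonneg (s : String) : 0 ≤ PySem.Str.len s := by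
  simp [PySem.Str.len_eq]

lemma loopA_eq (maxb : Int) (sel : List String) (acc : List String) (total : Int) :
    tlLoopA maxb sel acc total =
      (acc ++ sel.take (tlCount maxb sel total), decide (tlCount maxb sel total < sel.length)) := by
  induction sel generalizing acc total with
  | nil => simp [tlLoopA, tlCount]
  | cons line rest ih =>
    simp only [tlLoopA, tlCount, List.length_cons]
    split_ifs with h
    · simp
    · rw [ih]
      refine Prod.ext ?_ ?_
      · simp [Nat.add_comm 1, List.take_succ_cons, List.append_assoc]
      · simp only [decide_eq_decide]
        omega

lemma length_tlSums (sel : List String) (total : Int) :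
    (tlSums sel total).length = sel.length := by
  induction sel generalizing total with
  | nil => simp [tlSums]
  | cons line rest ih => simp [tlSums, ih]

lemma tlSums_ge (sel : List String) (total : Int) :
    ∀ i, i < sel.length → total ≤ (tlSums sel total).getD i 0 := by
  induction sel generalizing total with
  | nil => simp
  | cons line rest ih =>
    intro i hi
    have hnn := str_len_nonneg line
    cases i with
    | zero => simp [tlSums]
    | succ j =>
      simp only [tlSums, List.getD_cons_succ]
      have := ih (total + PySem.Str.len line) j (by simpa using hi)
      omega

lemma count_spec (maxb : Int) (sel : List String) (total : Int) :
    tlCount maxb sel total ≤ sel.length ∧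
      (∀ i < tlCount maxb sel total, (tlSums sel total).getD i 0 ≤ maxb) ∧
      (∀ i, tlCount maxb sel total ≤ i → i < sel.length → maxb < (tlSums sel total).getD i 0) := by
  induction sel generalizing total with
  | nil => simp [tlCount, tlSums]
  | cons line rest ih =>
    have hnn := str_len_nonneg line
    obtain ⟨ih1, ih2, ih3⟩ := ih (total + PySem.Str.len line)
    simp only [tlCount, tlSums, List.length_cons]
    split_ifs with h
    · refine ⟨by omega, by intro i hi; omega, ?_⟩
      intro i _ hi
      cases i with
      | zero => simp only [List.getD_cons_zero]; omega
      | succ j =>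
        simp only [List.getD_cons_succ]
        have := tlSums_ge rest (total + PySem.Str.len line) j (by omega)
        omega
    · refine ⟨by omega, ?_, ?_⟩
      · intro i hi
        cases i with
        | zero => simp only [List.getD_cons_zero]; omega
        | succ j =>
          simp only [List.getD_cons_succ]
          exact ih2 j (by omega)
      · intro i hi hlen
        cases i with
        | zero => omega
        | succ j =>
          simp only [List.getD_cons_succ]
          exact ih3 j (by omega) (by omega)

lemma bsearch_eq (sums : List Int) (maxb : Int) (c : Nat)
    (hle : ∀ i < c, sums.getD i 0 ≤ maxb)
    (hgt : ∀ i, c ≤ i → i < sums.length → maxb < sums.getD i 0) :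
    ∀ (n lo hi : Nat), hi - lo ≤ n → lo ≤ c → c ≤ hi → hi ≤ sums.length →
      tlBsearch sums maxb lo hi = c := by
  intro n
  induction n with
  | zero =>
    intro lo hi hn hlo hc hhi
    rw [tlBsearch]
    have : ¬ lo < hi := by omega
    simp [this]; omega
  | succ m ih =>
    intro lo hi hn hlo hc hhi
    rw [tlBsearch]
    by_cases hlt : lo < hi
    · simp only [dif_pos hlt]
      by_cases hmid : sums.getD ((lo + hi) / 2) 0 ≤ maxb
      · simp only [if_pos hmid]
        have hmidlt : (lo + hi) / 2 < c := by
          by_contra hcon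
          exact absurd hmid (not_le.mpr (hgt _ (by omega) (by omega)))
        exact ih ((lo + hi) / 2 + 1) hi (by omega) (by omega) hc hhi
      · simp only [if_neg hmid]
        have hcmid : c ≤ (lo + hi) / 2 := by
          by_contra hcon
          exact hmid (hle _ (by omega))
        exact ih lo ((lo + hi) / 2) (by omega) hlo hcmid (by omega)
    · simp [hlt]; omega

-- ===== VERDICT (by name: the statement is the Claim_ definition above) =====
theorem truncate_lines_spec : Claim_equal_truncate_lines := by
  intro lines offset limit max_bytes hdom
  clear hdom
  unfold Spec_truncate_lines truncate_lines truncate_lines_alt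
  dsimp only
  split_ifs with hguard
  · rfl
  · generalize PySem.List.slice lines (some (max 0 offset))
      (some (match limit with
        | some l => min (PySem.List.len lines) (max 0 offset + l)
        | none => PySem.List.len lines)) = sel
    obtain ⟨hc1, hc2, hc3⟩ := count_spec max_bytes sel 0
    have hgt' : ∀ i, tlCount max_bytes sel 0 ≤ i → i < (tlSums sel 0).length →
        max_bytes < (tlSums sel 0).getD i 0 := by
      intro i h1 h2
      exact hc3 i h1 (by rwa [length_tlSums] at h2)
    have hb := bsearch_eq (tlSums sel 0) max_bytes (tlCount max_bytes sel 0)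
      hc2 hgt' (tlSums sel 0).length 0 (tlSums sel 0).length (by omega) (by omega)
      (by rw [length_tlSums]; exact hc1) (le_refl _)
    rw [loopA_eq, hb]
    simp
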